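-- pv_equiv track=rewrite | github.com/HaymayndzUltra/voice-assistant-prod | add_health_check_batch2.py | find_class_end
-- ===== SOURCE A (Python) =====
-- def find_class_end(file_content: str, class_name: str) -> int:
--     """Find the end position of a class definition."""
--     lines = file_content.splitlines()
--     in_class = False
--     class_indent = 0
--
--     for i, line in enumerate(lines):
--         stripped = line.lstrip()
--         if not in_class and stripped.startswith(f"class {class_name}"):
--             in_class = True
--             class_indent = len(line) - len(stripped)
--         elif in_class:
--             if line.strip() and len(line) - len(line.lstrip()) <= class_indent:
--                 # Found a line with same or less indentation than the class definition
--                 return i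
--
--     # If we reach here, the class extends to the end of the file
--     return len(lines)
-- ===== SOURCE B (Python) =====
-- def find_class_end(file_content: str, class_name: str) -> int:
--     """Find end of class, declaratively: precompute indent tables, then take the
--     first element of filtered candidate index lists (no stateful scan, no break)."""
--     lines = file_content.splitlines()
--     strips = [l.lstrip() for l in lines]
--     indents = [len(l) - len(s) for l, s in zip(lines, strips)]
--     rows = list(enumerate(zip(lines, strips, indents)))
--     prefix = f"class {class_name}"
--     headers = [(i, ind) for i, (_, s, ind) in rows if s.startswith(prefix)]
--     if not headers:
--         return len(lines)
--     h, hindent = headers[0]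
--     dedents = [j for j, (l, _, ind) in rows if j > h and l.strip() and ind <= hindent]
--     return dedents[0] if dedents else len(lines)
-- ===== Notes on version B (the rewrite author's own statement) =====
-- stated objective: alternative
-- what changed: Replaces A's single stateful flag-driven scan with a declarative formulation: precompute lstrip/indent tables for all lines once, build the filtered list of header candidates and the filtered list of post-header dedent indices by comprehensions, and take each list's first element (len(lines) as default).
import Mathlib
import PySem

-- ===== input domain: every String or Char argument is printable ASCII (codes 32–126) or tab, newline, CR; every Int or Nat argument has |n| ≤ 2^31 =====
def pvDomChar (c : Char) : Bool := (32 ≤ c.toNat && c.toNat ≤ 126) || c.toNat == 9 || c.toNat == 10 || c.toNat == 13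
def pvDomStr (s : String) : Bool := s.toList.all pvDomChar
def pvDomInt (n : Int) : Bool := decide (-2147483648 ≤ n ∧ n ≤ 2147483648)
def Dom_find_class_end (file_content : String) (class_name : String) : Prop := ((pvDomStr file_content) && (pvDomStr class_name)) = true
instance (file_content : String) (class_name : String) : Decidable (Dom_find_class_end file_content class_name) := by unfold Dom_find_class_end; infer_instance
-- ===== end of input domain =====

-- B replaces A's flag-driven stateful scan by a declarative formulation: precomputed
-- strip/indent tables and first elements of filtered candidate index lists; same cost.

-- ===== PORT A =====
-- the flag-driven loop: state (in_class, class_indent), early return = some i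
def pvLoopA : List String → Int → Bool → Int → String → Option Int
  | [], _, _, _, _ => none
  | line :: rest, i, in_class, class_indent, target =>
    let stripped := PySem.Str.lstrip line
    if !in_class && PySem.Str.startswith stripped target then
      pvLoopA rest (i + 1) true ((PySem.Str.len line : Int) - (PySem.Str.len stripped : Int)) target
    else if in_class then
      if (!(PySem.Str.strip line == "")) &&
          decide ((PySem.Str.len line : Int) - (PySem.Str.len (PySem.Str.lstrip line) : Int) ≤ class_indent) then
        some i
      else
        pvLoopA rest (i + 1) in_class class_indent target
    else
      pvLoopA rest (i + 1) in_class class_indent target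

def find_class_end (file_content : String) (class_name : String) : Int :=
  let lines := PySem.Str.splitlines file_content
  match pvLoopA lines 0 false 0 ("class " ++ class_name) with
  | some i => i
  | none => (lines.length : Int)

-- ===== PORT B =====
def find_class_end_alt (file_content : String) (class_name : String) : Int :=
  let lines := PySem.Str.splitlines file_content
  let strips := lines.map PySem.Str.lstrip
  let indents := (List.zip lines strips).map
      (fun p => (PySem.Str.len p.1 : Int) - (PySem.Str.len p.2 : Int))
  let rows := PySem.List.enumerate (List.zip lines (List.zip strips indents)) 0
  let prefixStr := "class " ++ class_name
  let headers := (rows.filter (fun r => PySem.Str.startswith r.2.2.1 prefixStr)).map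
      (fun r => (r.1, r.2.2.2))
  match headers with
  | [] => (lines.length : Int)
  | (h, hindent) :: _ =>
    let dedents := (rows.filter (fun r =>
        decide (h < r.1) && (!(PySem.Str.strip r.2.1 == "")) && decide (r.2.2.2 ≤ hindent))).map
        (fun r => r.1)
    match dedents with
    | [] => (lines.length : Int)
    | j :: _ => j

-- ===== PRECONDITION & SPEC =====
def Spec_find_class_end (file_content : String) (class_name : String) (out : Int) : Prop := out = find_class_end_alt file_content class_name
instance (file_content : String) (class_name : String) (out : Int) : Decidable (Spec_find_class_end file_content class_name out) := by unfold Spec_find_class_end; infer_instance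

-- ===== CLAIM (what is proved, stated in full; the proofs are below) =====
def Claim_equal_find_class_end : Prop := ∀ (file_content : String) (class_name : String), Dom_find_class_end file_content class_name → Spec_find_class_end file_content class_name (find_class_end file_content class_name)

-- ===== LEMMAS AND PROOFS =====

-- proof-side intermediate forms: first header / first dedent as structural recursions
def pvHdr : List String → Int → String → Option (Int × Int)
  | [], _, _ => none
  | line :: rest, i, p =>
    if PySem.Str.startswith (PySem.Str.lstrip line) p then
      some (i, (PySem.Str.len line : Int) - (PySem.Str.len (PySem.Str.lstrip line) : Int))
    else pvHdr rest (i + 1) p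

def pvScan : List String → Int → Int → Option Int
  | [], _, _ => none
  | line :: rest, j, ind =>
    if (!(PySem.Str.strip line == "")) &&
        decide ((PySem.Str.len line : Int) - (PySem.Str.len (PySem.Str.lstrip line) : Int) ≤ ind) then
      some j
    else pvScan rest (j + 1) ind

-- the rows table B builds, as a function of the line list and the start index
def pvRows (lines : List String) (i : Int) : List (Int × String × String × Int) :=
  PySem.List.enumerate
    (List.zip lines (List.zip (lines.map PySem.Str.lstrip)
      ((List.zip lines (lines.map PySem.Str.lstrip)).map
        (fun p => (PySem.Str.len p.1 : Int) - (PySem.Str.len p.2 : Int))))) i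

theorem pvRows_nil (i : Int) : pvRows [] i = [] := rfl

theorem pvRows_cons (line : String) (rest : List String) (i : Int) :
    pvRows (line :: rest) i =
      (i, line, PySem.Str.lstrip line,
        (PySem.Str.len line : Int) - (PySem.Str.len (PySem.Str.lstrip line) : Int)) ::
      pvRows rest (i + 1) := rfl

theorem pvHdr_ge (lines : List String) (i : Int) (p : String) (h ind : Int)
    (hh : pvHdr lines i p = some (h, ind)) : i ≤ h := by
  induction lines generalizing i with
  | nil => simp [pvHdr] at hh
  | cons line rest ih =>
    rw [pvHdr] at hh
    split at hh
    · simp at hh; omega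
    · have := ih (i + 1) hh; omega

theorem pvLoopA_inclass (lines : List String) (i ind : Int) (p : String) :
    pvLoopA lines i true ind p = pvScan lines i ind := by
  induction lines generalizing i with
  | nil => rfl
  | cons line rest ih =>
    rw [pvLoopA, pvScan]
    simp only [Bool.not_true, Bool.false_and, Bool.false_eq_true, if_false]
    rw [if_pos trivial, ih (i + 1)]

theorem pvLoopA_eq (lines : List String) (i : Int) (p : String) :
    pvLoopA lines i false 0 p =
      (match pvHdr lines i p with
       | none => none
       | some (h, ind) => pvScan (lines.drop (h - i + 1).toNat) (h + 1) ind) := by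
  induction lines generalizing i with
  | nil => rfl
  | cons line rest ih =>
    rw [pvLoopA, pvHdr]
    simp only [Bool.not_false, Bool.true_and]
    split
    · have e : (i - i + 1).toNat = 1 := by omega
      simp [pvLoopA_inclass]
    · rw [ih (i + 1)]
      rcases hh : pvHdr rest (i + 1) p with _ | ⟨h, ind⟩
      · rfl
      · have hge := pvHdr_ge rest (i + 1) p h ind hh
        have e : (h - i + 1).toNat = (h - (i + 1) + 1).toNat + 1 := by omega
        simp [e]

-- B's headers list has pvHdr as its first element
theorem pvHeaders_eq (lines : List String) (i : Int) (p : String) :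
    (((pvRows lines i).filter (fun r => PySem.Str.startswith r.2.2.1 p)).map
      (fun r => (r.1, r.2.2.2))).head? = pvHdr lines i p := by
  induction lines generalizing i with
  | nil => rfl
  | cons line rest ih =>
    rw [pvRows_cons, pvHdr, List.filter_cons]
    by_cases hc : PySem.Str.startswith (PySem.Str.lstrip line) p = true
    · simp only [hc, if_true, List.map_cons, List.head?_cons]
    · simp only [Bool.not_eq_true] at hc
      simp only [hc, Bool.false_eq_true, if_false, ih (i + 1)]

-- B's dedents list, once past the header index, is pvScan
theorem pvDedents_high (lines : List String) (i h hind : Int) (hlt : h < i) :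
    (((pvRows lines i).filter (fun r =>
        decide (h < r.1) && (!(PySem.Str.strip r.2.1 == "")) && decide (r.2.2.2 ≤ hind))).map
      (fun r => r.1)).head? = pvScan lines i hind := by
  induction lines generalizing i with
  | nil => rfl
  | cons line rest ih =>
    rw [pvRows_cons, pvScan, List.filter_cons]
    have hd : decide (h < i) = true := decide_eq_true hlt
    by_cases hc : ((!(PySem.Str.strip line == "")) &&
        decide ((PySem.Str.len line : Int) - (PySem.Str.len (PySem.Str.lstrip line) : Int) ≤ hind)) = true
    · simp only [hd, hc, Bool.true_and, if_true, List.map_cons, List.head?_cons]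
    · simp only [Bool.not_eq_true] at hc
      simp only [hd, hc, Bool.true_and, Bool.false_eq_true, if_false, ih (i + 1) (by omega)]

theorem pvDedents_eq (lines : List String) (i h hind : Int) (hle : i ≤ h + 1) :
    (((pvRows lines i).filter (fun r =>
        decide (h < r.1) && (!(PySem.Str.strip r.2.1 == "")) && decide (r.2.2.2 ≤ hind))).map
      (fun r => r.1)).head? = pvScan (lines.drop (h - i + 1).toNat) (h + 1) hind := by
  induction lines generalizing i with
  | nil => simp [pvRows_nil, pvScan]
  | cons line rest ih =>
    by_cases hcase : i = h + 1
    · subst hcase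
      have e : (h - (h + 1) + 1).toNat = 0 := by omega
      rw [e, List.drop_zero]
      exact pvDedents_high (line :: rest) (h + 1) h hind (by omega)
    · have hd : decide (h < i) = false := decide_eq_false (by omega)
      have e : (h - i + 1).toNat = (h - (i + 1) + 1).toNat + 1 := by omega
      rw [pvRows_cons, List.filter_cons, e]
      simp only [hd, Bool.false_and, Bool.false_eq_true, if_false, List.drop_succ_cons]
      exact ih (i + 1) (by omega)

-- ===== VERDICT (by name: the statement is the Claim_ definition above) =====
theorem find_class_end_spec : Claim_equal_find_class_end := by
  intro file_content class_name _
  unfold Spec_find_class_end find_class_end find_class_end_alt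
  simp only [pvLoopA_eq]
  have hrows : PySem.List.enumerate
      (List.zip (PySem.Str.splitlines file_content)
        (List.zip ((PySem.Str.splitlines file_content).map PySem.Str.lstrip)
          ((List.zip (PySem.Str.splitlines file_content)
              ((PySem.Str.splitlines file_content).map PySem.Str.lstrip)).map
            (fun p => (PySem.Str.len p.1 : Int) - (PySem.Str.len p.2 : Int))))) 0 =
      pvRows (PySem.Str.splitlines file_content) 0 := rfl
  rw [hrows]
  rcases hh : pvHdr (PySem.Str.splitlines file_content) 0 ("class " ++ class_name)
    with _ | ⟨h, ind⟩
  · have hnil : ((pvRows (PySem.Str.splitlines file_content) 0).filter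
        (fun r => PySem.Str.startswith r.2.2.1 ("class " ++ class_name))).map
        (fun r => (r.1, r.2.2.2)) = [] := by
      rw [← List.head?_eq_none_iff, pvHeaders_eq, hh]
    rw [hnil]
  · dsimp only
    have hge : (0 : Int) ≤ h :=
      pvHdr_ge (PySem.Str.splitlines file_content) 0 ("class " ++ class_name) h ind hh
    have hhead : (((pvRows (PySem.Str.splitlines file_content) 0).filter
        (fun r => PySem.Str.startswith r.2.2.1 ("class " ++ class_name))).map
        (fun r => (r.1, r.2.2.2))).head? = some (h, ind) := by
      rw [pvHeaders_eq, hh]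
    obtain ⟨tl, htl⟩ := List.head?_eq_some_iff.mp hhead
    rw [htl]
    dsimp only
    have e : h - 0 + 1 = h + 1 := by omega
    rw [e]
    have hded := pvDedents_eq (PySem.Str.splitlines file_content) 0 h ind (by omega)
    rw [e] at hded
    rcases hs : pvScan ((PySem.Str.splitlines file_content).drop (h + 1).toNat) (h + 1) ind
      with _ | j
    · rw [hs, List.head?_eq_none_iff] at hded
      rw [hded]
    · rw [hs] at hded
      obtain ⟨tl2, htl2⟩ := List.head?_eq_some_iff.mp hded
      rw [htl2]
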